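-- pv_equiv track=rewrite | github.com/morganmcg1/pippa | grpo_archive/train_grpo_verifiable_callbacks.py | create_binary_conversion_dataset
-- ===== SOURCE A (Python) =====
-- from typing import List, Tuple, Dict, Any
--
-- def create_binary_conversion_dataset(n_samples: int = 100) -> List[Dict[str, str]]:
--     """Convert small numbers to binary - verifiable."""
--     prompts = []
--     # Use unique values up to n_samples to avoid duplicates
--     unique_numbers = min(n_samples, 16)  # Max 16 unique values for 0-15
--
--     for i in range(n_samples):
--         num = i % unique_numbers  # Cycle through unique values
--         answer = bin(num)[2:]  # Remove '0b' prefix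
--
--         prompts.append({
--             "prompt": f"Convert {num} to binary: ",
--             "expected": answer
--         })
--     return prompts
-- ===== SOURCE B (Python) =====
-- from typing import List, Dict
--
-- def create_binary_conversion_dataset(n_samples: int = 100) -> List[Dict[str, str]]:
--     """Convert small numbers to binary - verifiable."""
--     # Block replication: build the table of unique dicts once, then emit
--     # q whole copies of it plus a prefix of length r, where q, r = divmod(n, len(table)).
--     u = min(n_samples, 16)
--     base = [
--         {"prompt": f"Convert {num} to binary: ", "expected": format(num, "b")}
--         for num in range(u)
--     ]
--     if u <= 0:
--         return []
--     q, r = divmod(n_samples, u)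
--     return [dict(d) for d in base * q + base[:r]]
-- ===== Notes on version B (the rewrite author's own statement) =====
-- stated objective: alternative
-- what changed: Replaces A's single flat loop computing i % min(n,16) and re-formatting every item with a block-replication scheme: the unique-dict table is built once, q,r = divmod(n, len(table)), and the output is q whole copies of the table concatenated with its length-r prefix (fresh dict copies); no per-index modulo at all.
import Mathlib
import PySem

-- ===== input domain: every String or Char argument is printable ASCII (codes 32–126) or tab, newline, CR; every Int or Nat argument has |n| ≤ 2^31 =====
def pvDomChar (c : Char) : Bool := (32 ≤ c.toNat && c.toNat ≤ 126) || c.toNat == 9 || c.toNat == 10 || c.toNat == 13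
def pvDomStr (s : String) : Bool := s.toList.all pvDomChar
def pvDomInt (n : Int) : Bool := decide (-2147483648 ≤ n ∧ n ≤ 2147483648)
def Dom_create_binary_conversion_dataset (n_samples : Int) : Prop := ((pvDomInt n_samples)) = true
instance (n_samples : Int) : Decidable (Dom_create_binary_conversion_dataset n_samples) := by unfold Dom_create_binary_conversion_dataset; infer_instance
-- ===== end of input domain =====

-- B replaces A's flat loop (i % min(n,16) per item) with a block-replication scheme:
-- build the unique-dict table once, then q whole copies of it plus a length-r prefix
-- (q, r = divmod(n, len(table))); same cost, genuinely different decomposition.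


-- ===== PORT A =====
-- literal port of A: one loop over range(n_samples), appending a fresh dict each turn;
-- answer = bin(num)[2:] is PySem.Str.slice (PySem.Int.pyBin num) (some 2) none.
def create_binary_conversion_dataset (n_samples : Int) : List (List (String × String)) :=
  let unique_numbers : Int := min n_samples 16
  (PySem.List.pyRange 0 n_samples 1).foldl
    (fun prompts i =>
      let num := PySem.Int.mod i unique_numbers
      let answer := PySem.Str.slice (PySem.Int.pyBin num) (some 2) none
      prompts ++ [[("prompt", "Convert " ++ PySem.Int.toStr num ++ " to binary: "),
                   ("expected", answer)]])
    []

-- ===== PORT B =====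
-- port of Source B: table of unique dicts (format(num,'b') = PySem.Int.toBin), then
-- base * q (list multiplication = flatten of replicate, count clamped at 0 like Python)
-- ++ base[:r], with q, r = divmod(n_samples, u).
def create_binary_conversion_dataset_alt (n_samples : Int) : List (List (String × String)) :=
  let u : Int := min n_samples 16
  let base : List (List (String × String)) :=
    (PySem.List.pyRange 0 u 1).map
      (fun num =>
        [("prompt", "Convert " ++ PySem.Int.toStr num ++ " to binary: "),
         ("expected", PySem.Int.toBin num)])
  if u ≤ 0 then []
  else
    let q := PySem.Int.floordiv n_samples u
    let r := PySem.Int.mod n_samples u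
    (List.replicate q.toNat base).flatten ++ PySem.List.slice base none (some r)

-- ===== PRECONDITION & SPEC =====
def Spec_create_binary_conversion_dataset (n_samples : Int) (out : List (List (String × String))) : Prop := out = create_binary_conversion_dataset_alt n_samples
instance (n_samples : Int) (out : List (List (String × String))) : Decidable (Spec_create_binary_conversion_dataset n_samples out) := by unfold Spec_create_binary_conversion_dataset; infer_instance

-- ===== CLAIM (what is proved, stated in full; the proofs are below) =====
def Claim_equal_create_binary_conversion_dataset : Prop := ∀ (n_samples : Int), Dom_create_binary_conversion_dataset n_samples → Spec_create_binary_conversion_dataset n_samples (create_binary_conversion_dataset n_samples)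

-- ===== LEMMAS AND PROOFS =====

-- A's append loop is a map over the range.
theorem pv_foldl_append {α β : Type} (f : α → β) :
    ∀ (l : List α) (acc : List β),
      l.foldl (fun a x => a ++ [f x]) acc = acc ++ l.map f := by
  intro l
  induction l with
  | nil => intro acc; simp
  | cons x xs ih => intro acc; simp [List.foldl, ih]

-- for the 16 values num can take, bin(num)[2:] = format(num, 'b')
theorem pv_slice_pyBin (m : Int) (h0 : 0 ≤ m) (h16 : m < 16) :
    PySem.Str.slice (PySem.Int.pyBin m) (some 2) none = PySem.Int.toBin m := by
  interval_cases m <;> decide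

-- the cycle i ↦ g (i % U) over range (q*U + r) is q copies of the base block plus a prefix
theorem pv_cycle_blocks {α : Type} (g : Nat → α) (U : Nat) :
    ∀ (q r : Nat), r < U →
      (List.range (q * U + r)).map (fun k => g (k % U)) =
        (List.replicate q ((List.range U).map g)).flatten ++ (List.range r).map g := by
  intro q
  induction q with
  | zero =>
      intro r hr
      simp only [Nat.zero_mul, Nat.zero_add, List.replicate_zero, List.flatten_nil,
        List.nil_append]
      exact List.map_congr_left (fun k hk =>
        congrArg g (Nat.mod_eq_of_lt (lt_trans (List.mem_range.mp hk) hr)))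
  | succ q ih =>
      intro r hr
      have hsum : (q + 1) * U + r = U + (q * U + r) := by ring
      rw [hsum, List.range_add, List.map_append, List.map_map]
      -- rewrite the shifted second half: g ((U + j) % U) = g (j % U)
      have h2 : (List.range (q * U + r)).map ((fun k => g (k % U)) ∘ (fun j => U + j)) =
          (List.range (q * U + r)).map (fun k => g (k % U)) := by
        exact List.map_congr_left (fun j _ => congrArg g (Nat.add_mod_left U j))
      rw [h2, ih r hr]
      have h3 : (List.range U).map (fun k => g (k % U)) = (List.range U).map g :=
        List.map_congr_left (fun k hk => congrArg g (Nat.mod_eq_of_lt (List.mem_range.mp hk)))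
      rw [h3, List.replicate_succ, List.flatten_cons, List.append_assoc]

-- ===== VERDICT (by name: the statement is the Claim_ definition above) =====
theorem create_binary_conversion_dataset_spec : Claim_equal_create_binary_conversion_dataset := by
  intro n _
  unfold Spec_create_binary_conversion_dataset
  unfold create_binary_conversion_dataset create_binary_conversion_dataset_alt
  simp only [pv_foldl_append, List.nil_append]
  by_cases hn : n ≤ 0
  · have hu : min n 16 ≤ 0 := by omega
    rw [PySem.List.pyRange_one_eq_nil hn, if_pos hu]
    simp
  · have hn' : 0 < n := by omega
    have hupos : 0 < min n 16 := by omega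
    rw [if_neg (by omega)]
    set u : Int := min n 16 with hu_def
    set G : Int → List (String × String) := fun num =>
      [("prompt", "Convert " ++ PySem.Int.toStr num ++ " to binary: "),
       ("expected", PySem.Int.toBin num)] with hG
    -- A's per-item value equals B's for the residues 0 ≤ m < 16
    have hFG : ∀ i, i ∈ PySem.List.pyRange 0 n 1 →
        [("prompt", "Convert " ++ PySem.Int.toStr (PySem.Int.mod i u) ++ " to binary: "),
         ("expected", PySem.Str.slice (PySem.Int.pyBin (PySem.Int.mod i u)) (some 2) none)] =
          G (PySem.Int.mod i u) := by
      intro i _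
      have h0 := PySem.Int.mod_nonneg i hupos
      have h1 := PySem.Int.mod_lt i hupos
      simp only [hG]
      rw [pv_slice_pyBin _ h0 (by omega)]
    rw [List.map_congr_left hFG]
    -- switch to Nats
    obtain ⟨N, hN⟩ : ∃ N : Nat, n = (N : Int) := ⟨n.toNat, by omega⟩
    obtain ⟨U, hU⟩ : ∃ U : Nat, u = (U : Int) := ⟨u.toNat, by omega⟩
    have hUpos : 0 < U := by omega
    have hmod : ∀ k : Nat, PySem.Int.mod (k : Int) u = ((k % U : Nat) : Int) := by
      intro k; rw [hU]; exact PySem.Int.mod_natCast k U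
    have hA : (PySem.List.pyRange 0 n 1).map (fun i => G (PySem.Int.mod i u)) =
        (List.range N).map (fun k => G ((k % U : Nat) : Int)) := by
      rw [hN, PySem.List.pyRange_one, List.map_map]
      simp only [Int.sub_zero, Int.toNat_natCast]
      exact List.map_congr_left (fun k _ => by simp [hmod k])
    have hbase : (PySem.List.pyRange 0 u 1).map G =
        (List.range U).map (fun k => G ((k : Nat) : Int)) := by
      rw [hU, PySem.List.pyRange_one, List.map_map]
      simp only [Int.sub_zero, Int.toNat_natCast]
      exact List.map_congr_left (fun k _ => by simp)
    have hq : PySem.Int.floordiv n u = ((N / U : Nat) : Int) := by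
      rw [hN, hU]; exact PySem.Int.floordiv_natCast N U
    have hr : PySem.Int.mod n u = ((N % U : Nat) : Int) := by
      rw [hN, hU]; exact PySem.Int.mod_natCast N U
    rw [hA, hbase, hq, hr, Int.toNat_natCast,
      PySem.List.slice_to_natCast, ← List.map_take, List.take_range]
    have hmin : min (N % U) U = N % U := min_eq_left (le_of_lt (Nat.mod_lt N hUpos))
    rw [hmin]
    have := pv_cycle_blocks (fun k : Nat => G ((k : Nat) : Int)) U (N / U) (N % U)
      (Nat.mod_lt N hUpos)
    have hNeq : N / U * U + N % U = N := by rw [Nat.mul_comm]; exact Nat.div_add_mod N U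
    rw [hNeq] at this
    simpa using this
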